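-- pv_equiv track=rewrite | github.com/harmonc/advent-of-code | 2024/day_09/part-two.py | findFirstGap
-- ===== SOURCE A (Python) =====
-- def findFirstGap(arr, gapSize):
--     currentGap = 0
--     for i in range(len(arr)):
--         if arr[i] == -1:
--             currentGap += 1
--             if currentGap == gapSize:
--                 return i - gapSize + 1
--         else:
--             currentGap = 0
--     return -1
-- ===== SOURCE B (Python) =====
-- def findFirstGap(arr, gapSize):
--     # run-based scan: walk maximal runs of equal values, keeping the run's start index
--     i = 0
--     n = len(arr)
--     while i < n:
--         j = i
--         while j < n and arr[j] == arr[i]: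
--             j += 1
--         if arr[i] == -1 and gapSize >= 1 and j - i >= gapSize:
--             return i
--         i = j
--     return -1
-- ===== Notes on version B (the rewrite author's own statement) =====
-- stated objective: alternative
-- what changed: Replaces the per-element consecutive-gap counter with a run-based scan over maximal runs of equal values: each run is measured once and either returns its start index (run of -1 at least gapSize long) or is skipped whole.
import Mathlib
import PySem

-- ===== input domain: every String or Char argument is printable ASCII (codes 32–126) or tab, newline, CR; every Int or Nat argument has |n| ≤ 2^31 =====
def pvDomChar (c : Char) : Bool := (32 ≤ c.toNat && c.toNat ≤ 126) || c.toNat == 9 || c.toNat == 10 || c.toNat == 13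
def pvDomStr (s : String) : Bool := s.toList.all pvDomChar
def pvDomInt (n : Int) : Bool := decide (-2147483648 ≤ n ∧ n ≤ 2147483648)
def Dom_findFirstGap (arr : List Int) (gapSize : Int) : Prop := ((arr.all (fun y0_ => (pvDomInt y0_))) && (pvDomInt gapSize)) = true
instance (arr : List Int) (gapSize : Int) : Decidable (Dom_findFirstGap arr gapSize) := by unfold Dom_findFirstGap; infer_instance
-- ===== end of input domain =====

-- B rewrites A's per-element consecutive-(-1) counter as a run-based scan over maximal runs
-- of equal values (objective: alternative decomposition, same cost); return values proved equal.

-- ===== PORT A =====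
-- the for-loop over range(len(arr)) with early return, state (i, currentGap)
def findFirstGapGoA : List Int → Int → Int → Int → Int
  | [], _, _, _ => -1
  | x :: xs, i, currentGap, gapSize =>
    if x = -1 then
      if currentGap + 1 = gapSize then i - gapSize + 1
      else findFirstGapGoA xs (i + 1) (currentGap + 1) gapSize
    else findFirstGapGoA xs (i + 1) 0 gapSize

def findFirstGap (arr : List Int) (gapSize : Int) : Int :=
  findFirstGapGoA arr 0 0 gapSize

-- ===== PORT B =====
-- the outer while-loop of Source B: measure the maximal run starting at the current position
-- (the inner while-loop = takeWhile), return its start or skip the whole run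
def findFirstGapGoB : List Int → Int → Int → Int
  | [], _, _ => -1
  | x :: xs, idx, gapSize =>
    let t := (xs.takeWhile (· == x)).length
    if x = -1 ∧ 1 ≤ gapSize ∧ gapSize ≤ (t : Int) + 1 then idx
    else findFirstGapGoB (xs.drop t) (idx + ((t : Int) + 1)) gapSize
termination_by l _ _ => l.length
decreasing_by
  simp only [List.length_cons, List.length_drop]
  omega

def findFirstGap_alt (arr : List Int) (gapSize : Int) : Int :=
  findFirstGapGoB arr 0 gapSize

-- ===== PRECONDITION & SPEC =====
def Spec_findFirstGap (arr : List Int) (gapSize : Int) (out : Int) : Prop := out = findFirstGap_alt arr gapSize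
instance (arr : List Int) (gapSize : Int) (out : Int) : Decidable (Spec_findFirstGap arr gapSize out) := by unfold Spec_findFirstGap; infer_instance

-- ===== CLAIM (what is proved, stated in full; the proofs are below) =====
def Claim_equal_findFirstGap : Prop := ∀ (arr : List Int) (gapSize : Int), Dom_findFirstGap arr gapSize → Spec_findFirstGap arr gapSize (findFirstGap arr gapSize)

-- ===== LEMMAS AND PROOFS =====

-- dropping the length of the takeWhile prefix is dropWhile
lemma drop_takeWhile_len (p : Int → Bool) (l : List Int) :
    l.drop ((l.takeWhile p).length) = l.dropWhile p := by
  induction l with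
  | nil => rfl
  | cons x xs ih =>
    by_cases h : p x
    · rw [List.takeWhile_cons_of_pos h, List.dropWhile_cons_of_pos h]
      simpa using ih
    · rw [List.takeWhile_cons_of_neg h, List.dropWhile_cons_of_neg h]
      rfl

-- the head of dropWhile fails the predicate
lemma head_dropWhile_false (p : Int → Bool) (l : List Int) :
    ∀ y ys, l.dropWhile p = y :: ys → p y = false := by
  induction l with
  | nil => intro y ys h; simp [List.dropWhile] at h
  | cons x xs ih =>
    intro y ys h
    by_cases hx : p x
    · rw [List.dropWhile_cons_of_pos hx] at h; exact ih y ys h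
    · rw [List.dropWhile_cons_of_neg hx] at h
      cases h; simpa using hx

-- B skips a non-(-1) head one element at a time as well
lemma goB_skip (y : Int) (hy : ¬ y = -1) (ys : List Int) (idx g : Int) :
    findFirstGapGoB (y :: ys) idx g = findFirstGapGoB ys (idx + 1) g := by
  rw [findFirstGapGoB]
  simp only [hy, false_and, if_false]
  cases ys with
  | nil => simp [findFirstGapGoB]
  | cons z zs =>
    by_cases hz : z = y
    · subst hz
      rw [findFirstGapGoB]
      simp only [hy, false_and, if_false]
      have ht : ((z :: zs).takeWhile (· == z)).length
          = (zs.takeWhile (· == z)).length + 1 := by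
        rw [List.takeWhile_cons_of_pos (by simp)]
        simp
      rw [ht]
      simp only [List.drop_succ_cons]
      congr 1
      push_cast
      ring
    · have ht : ((z :: zs).takeWhile (· == y)).length = 0 := by
        rw [List.takeWhile_cons_of_neg (by simp [hz])]
        rfl
      rw [ht]
      simp

-- characterisation of A's loop: it consumes the leading run of -1s in one description
lemma goA_run (l : List Int) : ∀ (i cg g : Int),
    findFirstGapGoA l i cg g =
      if 1 ≤ g - cg ∧ g - cg ≤ ((l.takeWhile (· == (-1 : Int))).length : Int)
      then i - cg
      else findFirstGapGoA (l.dropWhile (· == (-1 : Int)))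
             (i + ((l.takeWhile (· == (-1 : Int))).length : Int)) 0 g := by
  induction l with
  | nil =>
    intro i cg g
    simp [findFirstGapGoA, List.takeWhile, List.dropWhile]
    omega
  | cons x xs ih =>
    intro i cg g
    by_cases hx : x = -1
    · subst hx
      have htw : ((-1 : Int) :: xs).takeWhile (· == (-1 : Int))
          = -1 :: xs.takeWhile (· == (-1 : Int)) :=
        List.takeWhile_cons_of_pos (by simp)
      have hdw : ((-1 : Int) :: xs).dropWhile (· == (-1 : Int))
          = xs.dropWhile (· == (-1 : Int)) :=
        List.dropWhile_cons_of_pos (by simp)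
      rw [findFirstGapGoA, if_pos rfl, htw, hdw]
      by_cases htr : cg + 1 = g
      · rw [if_pos htr]
        have : 1 ≤ g - cg ∧ g - cg ≤ ((-1 :: xs.takeWhile (· == (-1 : Int))).length : Int) := by
          simp only [List.length_cons]
          push_cast
          omega
        rw [if_pos this]
        omega
      · rw [if_neg htr, ih]
        by_cases hc : 1 ≤ g - (cg + 1) ∧ g - (cg + 1) ≤ ((xs.takeWhile (· == (-1 : Int))).length : Int)
        · rw [if_pos hc]
          have : 1 ≤ g - cg ∧ g - cg ≤ ((-1 :: xs.takeWhile (· == (-1 : Int))).length : Int) := by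
            simp only [List.length_cons]; push_cast; omega
          rw [if_pos this]
          omega
        · rw [if_neg hc]
          have : ¬ (1 ≤ g - cg ∧ g - cg ≤ ((-1 :: xs.takeWhile (· == (-1 : Int))).length : Int)) := by
            simp only [List.length_cons]; push_cast; push_cast at hc; omega
          rw [if_neg this]
          congr 1
          simp only [List.length_cons]
          push_cast
          ring
    · have htw : ((x :: xs).takeWhile (· == (-1 : Int))) = [] :=
        List.takeWhile_cons_of_neg (by simp [hx])
      have hdw : ((x :: xs).dropWhile (· == (-1 : Int))) = x :: xs :=
        List.dropWhile_cons_of_neg (by simp [hx])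
      rw [htw, hdw]
      have : ¬ (1 ≤ g - cg ∧ g - cg ≤ (([] : List Int).length : Int)) := by simp; omega
      rw [if_neg this]
      simp only [List.length_nil, Int.natCast_zero, add_zero]
      rw [findFirstGapGoA, if_neg hx, findFirstGapGoA, if_neg hx]

-- main equality, by strong induction on the list length
lemma goA_eq_goB : ∀ (n : Nat) (l : List Int), l.length ≤ n → ∀ (i g : Int),
    findFirstGapGoA l i 0 g = findFirstGapGoB l i g := by
  intro n
  induction n with
  | zero =>
    intro l hl i g
    have : l = [] := List.eq_nil_of_length_eq_zero (Nat.le_zero.mp hl)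
    subst this
    simp [findFirstGapGoA, findFirstGapGoB]
  | succ n ih =>
    intro l hl i g
    cases l with
    | nil => simp [findFirstGapGoA, findFirstGapGoB]
    | cons x xs =>
      by_cases hx : x = -1
      · subst hx
        have htw : ((-1 : Int) :: xs).takeWhile (· == (-1 : Int))
            = -1 :: xs.takeWhile (· == (-1 : Int)) :=
          List.takeWhile_cons_of_pos (by simp)
        have hdw : ((-1 : Int) :: xs).dropWhile (· == (-1 : Int))
            = xs.dropWhile (· == (-1 : Int)) :=
          List.dropWhile_cons_of_pos (by simp)
        rw [goA_run, htw, hdw, findFirstGapGoB]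
        have hA : (1 ≤ g - 0 ∧ g - 0 ≤ ((-1 :: xs.takeWhile (· == (-1 : Int))).length : Int))
            ↔ ((-1 : Int) = -1 ∧ 1 ≤ g ∧ g ≤ ((xs.takeWhile (· == (-1 : Int))).length : Int) + 1) := by
          simp only [List.length_cons, true_and]
          push_cast
          omega
        by_cases hg : (-1 : Int) = -1 ∧ 1 ≤ g ∧ g ≤ ((xs.takeWhile (· == (-1 : Int))).length : Int) + 1
        · rw [if_pos (hA.mpr hg), if_pos hg]
          omega
        · rw [if_neg (fun h => hg (hA.mp h)), if_neg hg,
              drop_takeWhile_len (· == (-1 : Int)) xs]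
          simp only [List.length_cons]
          have hidx : i + (((xs.takeWhile (· == (-1 : Int))).length + 1 : Nat) : Int)
              = i + (((xs.takeWhile (· == (-1 : Int))).length : Int) + 1) := by push_cast; ring
          rw [hidx]
          cases hr : xs.dropWhile (· == (-1 : Int)) with
          | nil => simp [findFirstGapGoA, findFirstGapGoB]
          | cons y ys =>
            have hy : ¬ y = -1 := by
              have := head_dropWhile_false (· == (-1 : Int)) xs y ys hr
              simpa using this
            have hlen : ys.length ≤ n := by
              have h1 : (y :: ys).length ≤ xs.length := by
                rw [← hr]; exact List.length_dropWhile_le _ _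
              have h2 : xs.length + 1 ≤ n + 1 := by simpa using hl
              simp only [List.length_cons] at h1
              omega
            rw [findFirstGapGoA, if_neg hy, goB_skip y hy,
                ih ys hlen (i + (((xs.takeWhile (· == (-1 : Int))).length : Int) + 1) + 1) g]
      · rw [findFirstGapGoA, if_neg hx, goB_skip x hx]
        have hlen : xs.length ≤ n := by
          simp only [List.length_cons] at hl; omega
        exact ih xs hlen (i + 1) g

-- ===== VERDICT (by name: the statement is the Claim_ definition above) =====
theorem findFirstGap_spec : Claim_equal_findFirstGap := by
  intro arr gapSize _
  unfold Spec_findFirstGap findFirstGap findFirstGap_alt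
  exact goA_eq_goB arr.length arr (le_refl _) 0 gapSize
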